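-- pv_equiv track=rewrite | github.com/JoWoonJi/Python_goormlevel | LV_2-2_연속점수.py | max_sum_straight
-- ===== SOURCE A (Python) =====
-- def max_sum_straight(s):
--     max_sum = 0
--     current_sum = 0
--
--     for i in range(len(s)):
--         # 현재 숫자와 이전 숫자가 연속되지 않은 경우
--         if i > 0 and s[i] != s[i - 1] + 1:
--             current_sum = 0
--
--         current_sum += s[i]
--         max_sum = max(max_sum, current_sum)
--
--     return max_sum
-- ===== SOURCE B (Python) =====
-- def max_sum_straight(s):
--     # Two pointers jump run by run; each maximal consecutive run s[i..j] is the
--     # arithmetic progression s[i], s[i]+1, ..., so its total is the closed form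
--     # L*s[i] + L*(L-1)//2 -- no element sums are ever accumulated.
--     n = len(s)
--     best = 0
--     i = 0
--     while i < n:
--         j = i
--         while j + 1 < n and s[j + 1] == s[j] + 1:
--             j += 1
--         length = j - i + 1
--         total = length * s[i] + length * (length - 1) // 2
--         if total > best:
--             best = total
--         i = j + 1
--     return best
-- ===== Notes on version B (the rewrite author's own statement) =====
-- stated objective: alternative
-- what changed: B replaces A's element-by-element running sum with resets and a running max over every prefix by a two-pointer scan that jumps run boundary to run boundary and computes each maximal consecutive run's total by the arithmetic-series closed form L*s[i] + L*(L-1)//2, never summing elements; equality rests on the fact that a positive prefix sum of a consecutive run never exceeds the run's closed-form total.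
import Mathlib
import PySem

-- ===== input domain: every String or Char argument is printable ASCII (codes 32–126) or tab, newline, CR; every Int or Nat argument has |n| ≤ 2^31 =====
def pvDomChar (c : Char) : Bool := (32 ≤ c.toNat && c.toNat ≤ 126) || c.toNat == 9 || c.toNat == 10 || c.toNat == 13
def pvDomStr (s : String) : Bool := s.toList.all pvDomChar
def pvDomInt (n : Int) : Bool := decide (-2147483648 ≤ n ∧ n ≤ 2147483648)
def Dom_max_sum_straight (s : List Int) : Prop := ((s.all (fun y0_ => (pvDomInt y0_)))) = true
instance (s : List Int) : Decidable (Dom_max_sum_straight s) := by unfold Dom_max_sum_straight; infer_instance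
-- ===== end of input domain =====

-- B jumps run boundary to run boundary with two pointers and computes each maximal consecutive
-- run's total by the arithmetic-series closed form L*s[i] + L*(L-1)//2 (never summing elements),
-- while A keeps a running element sum with in-loop resets and a running max over every prefix sum.

-- ===== PORT A =====
def max_sum_straight (s : List Int) : Int :=
  ((PySem.List.pyRange 0 (s.length : Int) 1).foldl (fun (st : Int × Int) i =>
      let c0 : Int := if i > 0 ∧ PySem.List.pyGetD s i 0 ≠ PySem.List.pyGetD s (i - 1) 0 + 1 then 0 else st.2
      let c : Int := c0 + PySem.List.pyGetD s i 0
      (max st.1 c, c)) (0, 0)).1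

-- ===== PORT B =====
-- inner while loop of Source B: advance j while s[j+1] == s[j] + 1
-- (the guard j + 1 < n keeps both indices in range, so List.getD is exact for s[j], s[j+1];
--  the fuel argument only makes the recursion structural — s.length iterations always suffice)
def pvFindRunEnd (s : List Int) : Nat → Nat → Nat
  | 0, j => j
  | fuel + 1, j =>
    if j + 1 < s.length ∧ s.getD (j + 1) 0 = s.getD j 0 + 1 then pvFindRunEnd s fuel (j + 1) else j

-- outer while loop of Source B: one iteration per maximal run, closed-form run total
def pvOuter (s : List Int) : Nat → Nat → Int → Int
  | 0, _, best => best
  | fuel + 1, i, best =>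
    if i < s.length then
      let j := pvFindRunEnd s s.length i
      let L : Int := ((j - i + 1 : Nat) : Int)
      let total : Int := L * s.getD i 0 + PySem.Int.floordiv (L * (L - 1)) 2
      pvOuter s fuel (j + 1) (if total > best then total else best)
    else best

def max_sum_straight_alt (s : List Int) : Int := pvOuter s s.length 0 0

-- ===== PRECONDITION & SPEC =====
def Spec_max_sum_straight (s : List Int) (out : Int) : Prop := out = max_sum_straight_alt s
instance (s : List Int) (out : Int) : Decidable (Spec_max_sum_straight s out) := by unfold Spec_max_sum_straight; infer_instance

-- ===== CLAIM (what is proved, stated in full; the proofs are below) =====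
def Claim_equal_max_sum_straight : Prop := ∀ (s : List Int), Dom_max_sum_straight s → Spec_max_sum_straight s (max_sum_straight s)

-- ===== LEMMAS AND PROOFS =====

-- proof-side mirror of the run decomposition: run totals kept in reverse order (current run first)
def pvStepBC (st : List Int × Option Int) (x : Int) : List Int × Option Int :=
  match st with
  | (h :: t, some p) => if p + 1 = x then ((h + x) :: t, some x) else (x :: h :: t, some x)
  | (sums, _) => (x :: sums, some x)

-- A's loop as a structural recursion carrying (previous element, current sum, best)
def pvGoA : Int → Int → Int → List Int → Int
  | _, _, best, [] => best
  | p, cur, best, x :: xs =>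
    pvGoA x ((if x ≠ p + 1 then 0 else cur) + x) (max best ((if x ≠ p + 1 then 0 else cur) + x)) xs

lemma foldl_max_le (l : List Int) (a c : Int) (ha : a ≤ c) (h : ∀ u ∈ l, u ≤ c) :
    l.foldl max a ≤ c := by
  induction l generalizing a with
  | nil => simpa using ha
  | cons x t ih =>
      exact ih (max a x) (max_le ha (h x (by simp))) (fun u hu => h u (by simp [hu]))

-- tail entries of the grouping state are preserved (only the head entry is ever updated)
lemma pvTailBound (rest : List Int) : ∀ (p h : Int) (t : List Int) (u : Int), u ∈ t →
    u ≤ ((rest.foldl pvStepBC (h :: t, some p)).1).foldl max 0 := by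
  induction rest with
  | nil =>
      intro p h t u hu
      exact (PySem.List.le_foldl_max (h :: t) 0).2 u (by simp [hu])
  | cons y ys ih =>
      intro p h t u hu
      simp only [List.foldl_cons, pvStepBC]
      split
      · exact ih _ _ _ _ hu
      · exact ih _ _ _ _ (by simp [hu])

-- once the head entry of a run is nonnegative and the last element is nonnegative,
-- that run's entry only grows, so the final reduction is at least the current head
lemma pvHeadBound (rest : List Int) : ∀ (p x : Int) (t : List Int), 0 ≤ x → 0 ≤ p →
    x ≤ ((rest.foldl pvStepBC (x :: t, some p)).1).foldl max 0 := by
  induction rest with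
  | nil =>
      intro p x t _ _
      exact (PySem.List.le_foldl_max (x :: t) 0).2 x (by simp)
  | cons y ys ih =>
      intro p x t hx hp
      simp only [List.foldl_cons, pvStepBC]
      split
      · rename_i hy
        have h1 : x ≤ x + y := by omega
        exact le_trans h1 (ih y (x + y) t (by omega) (by omega))
      · exact pvTailBound ys y y (x :: t) x (by simp)

-- main invariant: A's recursion vs the grouping fold
lemma pvMain (rest : List Int) : ∀ (p cur best : Int) (t : List Int),
    0 ≤ best → t.foldl max 0 ≤ best → cur ≤ best → (0 < cur → 0 < p) →
    pvGoA p cur best rest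
      = max best (((rest.foldl pvStepBC (cur :: t, some p)).1).foldl max 0) := by
  induction rest with
  | nil =>
      intro p cur best t hb ht hc _
      have h1 : ((cur :: t).foldl max 0) ≤ best := by
        refine foldl_max_le t (max 0 cur) best (by omega) ?_
        intro u hu
        exact le_trans ((PySem.List.le_foldl_max t 0).2 u hu) ht
      simp only [pvGoA, List.foldl_nil]
      omega
  | cons x xs ih =>
      intro p cur best t hb ht hc hinv
      by_cases hx : x = p + 1
      · -- run continues
        have e1 : pvGoA p cur best (x :: xs) = pvGoA x (cur + x) (max best (cur + x)) xs := by
          simp [pvGoA, hx]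
        have e2 : (x :: xs).foldl pvStepBC (cur :: t, some p) = xs.foldl pvStepBC ((cur + x) :: t, some x) := by
          simp [List.foldl_cons, pvStepBC, hx]
        rw [e1, e2]
        have hinv' : 0 < cur + x → 0 < x := by
          intro hpos
          by_contra hxe
          have hp0 : p < 0 := by omega
          have : cur ≤ 0 := by
            by_contra hcc
            exact absurd (hinv (by omega)) (by omega)
          omega
        have := ih x (cur + x) (max best (cur + x)) t (by omega)
          (le_trans ht (by omega)) (by omega) hinv'
        rw [this]
        by_cases hpos : 0 < cur + x
        · have hge := pvHeadBound xs x (cur + x) t (by omega) (by omega)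
          omega
        · have h2 : cur + x ≤ best := by omega
          set F := ((xs.foldl pvStepBC ((cur + x) :: t, some x)).1).foldl max 0
          omega
      · -- new run starts
        have e1 : pvGoA p cur best (x :: xs) = pvGoA x x (max best x) xs := by
          simp [pvGoA, hx]
        have e2 : (x :: xs).foldl pvStepBC (cur :: t, some p) = xs.foldl pvStepBC (x :: cur :: t, some x) := by
          have hstep : ¬ (p + 1 = x) := fun h => hx h.symm
          simp [List.foldl_cons, pvStepBC, hstep]
        rw [e1, e2]
        have ht' : ((cur :: t).foldl max 0) ≤ max best x := by
          refine foldl_max_le t (max 0 cur) (max best x) (by omega) ?_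
          intro u hu
          exact le_trans ((PySem.List.le_foldl_max t 0).2 u hu) (by omega)
        have := ih x x (max best x) (cur :: t) (by omega) ht' (by omega) (fun h => h)
        rw [this]
        by_cases hpos : 0 < x
        · have hge := pvHeadBound xs x x (cur :: t) (by omega) (by omega)
          omega
        · set F := ((xs.foldl pvStepBC (x :: cur :: t, some x)).1).foldl max 0
          omega

-- bridge: A's indexed fold over pyRange equals the structural recursion pvGoA
lemma pvBridge (s : List Int) : ∀ (m k : Nat) (best cur : Int), k + 1 ≤ s.length → m = s.length - (k + 1) →
    ((PySem.List.pyRange ((k + 1 : Nat) : Int) (s.length : Int) 1).foldl (fun (st : Int × Int) i =>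
        let c0 : Int := if i > 0 ∧ PySem.List.pyGetD s i 0 ≠ PySem.List.pyGetD s (i - 1) 0 + 1 then 0 else st.2
        let c : Int := c0 + PySem.List.pyGetD s i 0
        (max st.1 c, c)) (best, cur)).1
      = pvGoA (s.getD k 0) cur best (s.drop (k + 1)) := by
  intro m
  induction m with
  | zero =>
      intro k best cur hk hm
      have hlen : k + 1 = s.length := by omega
      rw [PySem.List.pyRange_one_eq_nil (by exact_mod_cast hlen.ge)]
      rw [List.drop_eq_nil_of_le hlen.ge]
      simp [pvGoA]
  | succ n ih =>
      intro k best cur hk hm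
      have hlt : k + 1 < s.length := by omega
      rw [PySem.List.pyRange_one_cons (by exact_mod_cast hlt)]
      have hg1 : PySem.List.pyGetD s ((k + 1 : Nat) : Int) 0 = s.getD (k + 1) 0 :=
        PySem.List.pyGetD_natCast s (k + 1) 0
      have hg2 : PySem.List.pyGetD s (((k + 1 : Nat) : Int) - 1) 0 = s.getD k 0 := by
        have : ((k + 1 : Nat) : Int) - 1 = ((k : Nat) : Int) := by push_cast; ring
        rw [this, PySem.List.pyGetD_natCast]
      have hdrop : s.drop (k + 1) = s.getD (k + 1) 0 :: s.drop (k + 2) := by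
        rw [List.getD_eq_getElem _ _ hlt, List.drop_eq_getElem_cons hlt]
      have hpos : ((k + 1 : Nat) : Int) > 0 := by positivity
      simp only [List.foldl_cons, hg1, hg2, hpos, true_and]
      have hc : ((k + 1 : Nat) : Int) + 1 = (((k + 1) + 1 : Nat) : Int) := by push_cast; ring
      rw [hc, ih (k + 1) _ _ (by omega) (by omega), hdrop]
      simp only [pvGoA]

lemma foldl_max_shift (t : List Int) : ∀ (a x : Int), t.foldl max (max a x) = max (t.foldl max a) x := by
  induction t with
  | nil => intro a x; rfl
  | cons y t ih =>
      intro a x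
      simp only [List.foldl_cons]
      rw [max_right_comm a x y, ih]

lemma foldl_max_reverse (l : List Int) : ∀ (a : Int), l.reverse.foldl max a = l.foldl max a := by
  induction l with
  | nil => intro a; rfl
  | cons x t ih =>
      intro a
      simp only [List.reverse_cons, List.foldl_append, List.foldl_cons, List.foldl_nil, ih, foldl_max_shift]

-- ---- B-side proof apparatus: structural run decomposition ----

-- length of the consecutive run continuing a previous value p
def pvRunLen (p : Int) : List Int → Nat
  | [] => 0
  | y :: ys => if y = p + 1 then pvRunLen y ys + 1 else 0

-- element sum of that run
def pvRunSum (p : Int) : List Int → Int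
  | [] => 0
  | y :: ys => if y = p + 1 then y + pvRunSum y ys else 0

-- run totals (current run open with accumulated total h, previous value p), in order
def pvRunsFrom (p h : Int) : List Int → List Int
  | [] => [h]
  | y :: ys => if p + 1 = y then pvRunsFrom y (h + y) ys else h :: pvRunsFrom y y ys

def pvRunsL : List Int → List Int
  | [] => []
  | x :: xs => pvRunsFrom x x xs

-- structural mirror of B's outer loop (consume one run, recurse on the rest)
def pvOuterS (best : Int) : List Int → Int
  | [] => best
  | x :: xs =>
    let k := pvRunLen x xs
    let L : Int := ((k + 1 : Nat) : Int)
    let total : Int := L * x + PySem.Int.floordiv (L * (L - 1)) 2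
    pvOuterS (if total > best then total else best) (xs.drop k)
termination_by l => l.length
decreasing_by simp only [List.length_drop, List.length_cons]; omega

-- bridge: the inner while loop computes i + (structural run length), given enough fuel
lemma pvFindRunEnd_eq (s : List Int) : ∀ (fuel i : Nat), i < s.length → s.length - i ≤ fuel + 1 →
    pvFindRunEnd s fuel i = i + pvRunLen (s.getD i 0) (s.drop (i + 1)) := by
  intro fuel
  induction fuel with
  | zero =>
      intro i hi hm
      rw [List.drop_eq_nil_of_le (by omega)]
      simp [pvFindRunEnd, pvRunLen]
  | succ n ih =>
      intro i hi hm
      simp only [pvFindRunEnd]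
      split
      · rename_i hc
        obtain ⟨h1, h2⟩ := hc
        have hdrop : s.drop (i + 1) = s.getD (i + 1) 0 :: s.drop (i + 1 + 1) := by
          rw [List.getD_eq_getElem _ _ h1, List.drop_eq_getElem_cons h1]
        have hrl : pvRunLen (s.getD i 0) (s.getD (i + 1) 0 :: s.drop (i + 1 + 1))
            = pvRunLen (s.getD (i + 1) 0) (s.drop (i + 1 + 1)) + 1 := by
          simp only [pvRunLen]
          rw [if_pos h2]
        rw [hdrop, hrl, ih (i + 1) h1 (by omega)]
        omega
      · rename_i hc
        by_cases h1 : i + 1 < s.length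
        · have h2 : ¬ s.getD (i + 1) 0 = s.getD i 0 + 1 := fun h => hc ⟨h1, h⟩
          have hdrop : s.drop (i + 1) = s.getD (i + 1) 0 :: s.drop (i + 1 + 1) := by
            rw [List.getD_eq_getElem _ _ h1, List.drop_eq_getElem_cons h1]
          have hrl : pvRunLen (s.getD i 0) (s.getD (i + 1) 0 :: s.drop (i + 1 + 1)) = 0 := by
            simp only [pvRunLen]
            rw [if_neg h2]
          rw [hdrop, hrl]
          omega
        · rw [List.drop_eq_nil_of_le (by omega)]
          simp [pvRunLen]

-- bridge: B's fueled outer loop equals the structural mirror on the remaining suffix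
lemma pvOuter_eq (s : List Int) : ∀ (fuel i : Nat) (best : Int), s.length ≤ fuel + i →
    pvOuter s fuel i best = pvOuterS best (s.drop i) := by
  intro fuel
  induction fuel with
  | zero =>
      intro i best hm
      rw [List.drop_eq_nil_of_le (by omega)]
      simp [pvOuter, pvOuterS]
  | succ n ih =>
      intro i best hm
      simp only [pvOuter]
      split
      · rename_i hi
        have hdrop : s.drop i = s.getD i 0 :: s.drop (i + 1) := by
          rw [List.getD_eq_getElem _ _ hi, List.drop_eq_getElem_cons hi]
        have hj : pvFindRunEnd s s.length i
            = i + pvRunLen (s.getD i 0) (s.drop (i + 1)) :=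
          pvFindRunEnd_eq s s.length i hi (by omega)
        rw [hdrop]
        simp only [pvOuterS]
        set k := pvRunLen (s.getD i 0) (s.drop (i + 1)) with hk
        rw [hj]
        have hL : i + k - i + 1 = k + 1 := by omega
        rw [hL]
        have hrest : s.drop (i + k + 1) = (s.drop (i + 1)).drop k := by
          rw [List.drop_drop]
          congr 1
          omega
        rw [ih (i + k + 1) _ (by omega), hrest]
      · rename_i hi
        rw [List.drop_eq_nil_of_le (by omega)]
        simp [pvOuterS]

-- Gauss: twice the run sum in closed form
lemma pvRunSum_gauss (l : List Int) : ∀ (p : Int),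
    2 * pvRunSum p l = (pvRunLen p l : Int) * (2 * p + (pvRunLen p l : Int) + 1) := by
  induction l with
  | nil => intro p; simp [pvRunSum, pvRunLen]
  | cons y ys ih =>
      intro p
      by_cases hy : y = p + 1
      · simp only [pvRunSum, pvRunLen, if_pos hy]
        have := ih y
        push_cast
        subst hy
        linear_combination this
      · simp [pvRunSum, pvRunLen, hy]

-- the closed-form run total equals first element + run sum
lemma pvTotal_eq (x : Int) (xs : List Int) :
    ((pvRunLen x xs + 1 : Nat) : Int) * x
      + PySem.Int.floordiv (((pvRunLen x xs + 1 : Nat) : Int) * (((pvRunLen x xs + 1 : Nat) : Int) - 1)) 2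
    = x + pvRunSum x xs := by
  have hg := pvRunSum_gauss xs x
  set k : Int := (pvRunLen x xs : Int) with hk
  have hL : ((pvRunLen x xs + 1 : Nat) : Int) = k + 1 := by push_cast; ring
  rw [hL]
  have h2 : (k + 1) * ((k + 1) - 1) = 2 * (pvRunSum x xs - k * x) := by
    linear_combination -hg
  rw [h2, PySem.Int.floordiv_eq_ediv_of_pos (by norm_num),
      Int.mul_ediv_cancel_left _ (by norm_num)]
  ring

-- unfolding pvRunsFrom by one whole run
lemma pvRunsFrom_unfold (l : List Int) : ∀ (p h : Int),
    pvRunsFrom p h l = (h + pvRunSum p l) :: pvRunsL (l.drop (pvRunLen p l)) := by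
  induction l with
  | nil => intro p h; simp [pvRunsFrom, pvRunSum, pvRunLen, pvRunsL]
  | cons y ys ih =>
      intro p h
      by_cases hy : y = p + 1
      · have hy' : p + 1 = y := hy.symm
        simp only [pvRunsFrom, if_pos hy', pvRunSum, pvRunLen, if_pos hy, List.drop_succ_cons]
        rw [ih y (h + y)]
        ring_nf
      · have hy' : ¬ (p + 1 = y) := fun h => hy h.symm
        simp [pvRunsFrom, hy', pvRunSum, pvRunLen, hy, pvRunsL]

-- B's structural loop reduces the run totals with max
lemma pvOuterS_eq (n : Nat) : ∀ (l : List Int), l.length ≤ n → ∀ (best : Int),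
    pvOuterS best l = (pvRunsL l).foldl max best := by
  induction n with
  | zero =>
      intro l hl best
      have : l = [] := List.eq_nil_of_length_eq_zero (by omega)
      subst this
      simp [pvOuterS, pvRunsL]
  | succ n ih =>
      intro l hl best
      cases l with
      | nil => simp [pvOuterS, pvRunsL]
      | cons x xs =>
          have hstep : pvOuterS best (x :: xs)
              = pvOuterS (if ((pvRunLen x xs + 1 : Nat) : Int) * x
                    + PySem.Int.floordiv (((pvRunLen x xs + 1 : Nat) : Int) * (((pvRunLen x xs + 1 : Nat) : Int) - 1)) 2 > best
                  then ((pvRunLen x xs + 1 : Nat) : Int) * x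
                    + PySem.Int.floordiv (((pvRunLen x xs + 1 : Nat) : Int) * (((pvRunLen x xs + 1 : Nat) : Int) - 1)) 2
                  else best) (xs.drop (pvRunLen x xs)) := by
            rw [pvOuterS]
          rw [hstep]
          have hdl : (xs.drop (pvRunLen x xs)).length ≤ n := by
            simp only [List.length_drop]
            simp at hl
            omega
          rw [ih _ hdl]
          have hruns : pvRunsL (x :: xs) = (x + pvRunSum x xs) :: pvRunsL (xs.drop (pvRunLen x xs)) := by
            simp only [pvRunsL]
            exact pvRunsFrom_unfold xs x x
          rw [hruns, List.foldl_cons, pvTotal_eq x xs]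
          congr 1
          omega

-- the grouping fold carries exactly the reversed run totals
lemma pvFoldBC_eq (xs : List Int) : ∀ (p h : Int) (t : List Int),
    (xs.foldl pvStepBC (h :: t, some p)).1 = (pvRunsFrom p h xs).reverse ++ t := by
  induction xs with
  | nil => intro p h t; simp [pvRunsFrom]
  | cons y ys ih =>
      intro p h t
      simp only [List.foldl_cons]
      by_cases hy : p + 1 = y
      · have e : pvStepBC (h :: t, some p) y = ((h + y) :: t, some y) := by
          simp [pvStepBC, hy]
        rw [e, ih y (h + y) t]
        simp [pvRunsFrom, hy]
      · have e : pvStepBC (h :: t, some p) y = (y :: h :: t, some y) := by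
          simp [pvStepBC, hy]
        rw [e, ih y y (h :: t)]
        simp [pvRunsFrom, hy]

-- unfold B's answer one step at the head of the input
lemma pvAltCons (x : Int) (xs : List Int) :
    max_sum_straight_alt (x :: xs) = ((xs.foldl pvStepBC ([x], some x)).1).foldl max 0 := by
  rw [pvFoldBC_eq xs x x [], List.append_nil, foldl_max_reverse]
  unfold max_sum_straight_alt
  rw [pvOuter_eq (x :: xs) (x :: xs).length 0 0 (by omega), List.drop_zero,
      pvOuterS_eq (x :: xs).length (x :: xs) (le_refl _) 0]
  rfl

-- ===== VERDICT (by name: the statement is the Claim_ definition above) =====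
theorem max_sum_straight_spec : Claim_equal_max_sum_straight := by
  intro s _
  unfold Spec_max_sum_straight
  cases s with
  | nil =>
      unfold max_sum_straight max_sum_straight_alt
      simp [pvOuter, PySem.List.pyRange_one_eq_nil (by norm_num : (0:Int) ≤ 0)]
  | cons x xs =>
      unfold max_sum_straight
      have hlen : ((x :: xs).length : Int) = ((xs.length + 1 : Nat) : Int) := by simp
      rw [hlen, PySem.List.pyRange_one_cons (by positivity)]
      simp only [List.foldl_cons]
      have h0 : ¬ ((0 : Int) > 0 ∧ PySem.List.pyGetD (x :: xs) 0 0 ≠ PySem.List.pyGetD (x :: xs) (0 - 1) 0 + 1) := by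
        simp
      simp only [h0, if_false]
      have hg0 : PySem.List.pyGetD (x :: xs) 0 0 = x := PySem.List.pyGetD_zero_cons x xs 0
      have h01 : (0 : Int) + 1 = ((1 : Nat) : Int) := by norm_num
      rw [hg0, h01]
      have hb := pvBridge (x :: xs) (xs.length) 0 (max 0 (0 + x)) (0 + x) (by simp) (by simp)
      simp only [List.length_cons] at hb ⊢
      rw [hb]
      have hgd : (x :: xs).getD 0 0 = x := rfl
      have hdrop : (x :: xs).drop 1 = xs := rfl
      rw [hgd, hdrop]
      have hm := pvMain xs x (0 + x) (max 0 (0 + x)) [] (by omega) (by simp) (by omega) (by omega)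
      rw [hm, pvAltCons]
      have hz : (0 : Int) + x = x := by ring
      rw [hz]
      have h1 := (PySem.List.le_foldl_max ((xs.foldl pvStepBC ([x], some x)).1) 0).1
      by_cases hxp : 0 < x
      · have := pvHeadBound xs x x [] (by omega) (by omega)
        omega
      · omega
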